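-- pv_equiv track=rewrite | github.com/LSDOlab/talos | talos/utils/utils.py | get_array_expansion_data
-- ===== SOURCE A (Python) =====
-- def get_array_expansion_data(shape, expand_indices):
--     alphabet = 'abcdefghij'
--
--     in_string = ''
--     out_string = ''
--     ones_string = ''
--     in_shape = []
--     out_shape = []
--     ones_shape = []
--     for index in range(len(shape)):
--         if index not in expand_indices:
--             in_string += alphabet[index]
--             in_shape.append(shape[index])
--         else:
--             ones_string += alphabet[index]
--             ones_shape.append(shape[index])
--         out_string += alphabet[index]
--         out_shape.append(shape[index])
--
--     einsum_string = '{},{}->{}'.format(in_string, ones_string, out_string)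
--     in_shape = tuple(in_shape)
--     out_shape = tuple(out_shape)
--     ones_shape = tuple(ones_shape)
--
--     return einsum_string, in_shape, out_shape, ones_shape
-- ===== SOURCE B (Python) =====
-- def get_array_expansion_data(shape, expand_indices):
--     alphabet = 'abcdefghij'
--     n = len(shape)
--     out_string = alphabet[:n]
--     ones_pos = sorted({i for i in expand_indices if 0 <= i < n})
--     ones_string = ''.join(alphabet[i] for i in ones_pos)
--     ones_shape = tuple(shape[i] for i in ones_pos)
--     in_chars = list(out_string)
--     in_dims = list(shape)
--     for i in reversed(ones_pos):
--         del in_chars[i]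
--         del in_dims[i]
--     einsum_string = '{},{}->{}'.format(''.join(in_chars), ones_string, out_string)
--     return einsum_string, tuple(in_dims), tuple(shape), ones_shape
-- ===== Notes on version B (the rewrite author's own statement) =====
-- stated objective: alternative
-- what changed: A's single fused loop testing every index for membership in expand_indices is replaced by a positions-first algorithm: compute the sorted set of valid expansion positions once, read the 'ones' parts off those positions directly, and obtain the 'in' parts by deleting those positions (largest first) from the closed-form out parts alphabet[:n] and list(shape); no per-index membership test remains.
import Mathlib
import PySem

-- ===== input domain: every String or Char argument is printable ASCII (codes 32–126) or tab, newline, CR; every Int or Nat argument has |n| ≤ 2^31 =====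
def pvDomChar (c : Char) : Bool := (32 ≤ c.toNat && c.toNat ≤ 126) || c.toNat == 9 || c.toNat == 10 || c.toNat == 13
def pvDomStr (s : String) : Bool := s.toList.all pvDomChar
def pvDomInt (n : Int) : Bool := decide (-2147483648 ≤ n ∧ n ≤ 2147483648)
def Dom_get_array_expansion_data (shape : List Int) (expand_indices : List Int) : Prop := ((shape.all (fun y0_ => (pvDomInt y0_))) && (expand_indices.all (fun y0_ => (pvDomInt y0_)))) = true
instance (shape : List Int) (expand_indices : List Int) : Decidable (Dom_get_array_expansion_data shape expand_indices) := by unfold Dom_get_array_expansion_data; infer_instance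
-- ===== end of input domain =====

-- B replaces A's fused per-index membership-testing loop by a positions-first algorithm:
-- the sorted set of valid expansion positions is computed once, the "ones" parts are read off
-- those positions, and the "in" parts are obtained by deleting those positions (largest first)
-- from the closed-form out parts alphabet[:n] / list(shape) (objective: alternative algorithm).

-- ===== PORT A =====
-- loop body of A (one `for index in range(len(shape))` iteration);
-- state = (in_string, out_string, ones_string, in_shape, out_shape, ones_shape)
def gaedStep (shape : List Int) (expand_indices : List Int)
    (st : List Char × List Char × List Char × List Int × List Int × List Int) (index : Int) :
    List Char × List Char × List Char × List Int × List Int × List Int :=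
  -- alphabet[index] / shape[index]: pyGetD is exact here under Pre_ (0 ≤ index < 10 and index < len(shape))
  let c := PySem.List.pyGetD ("abcdefghij".toList) index ' '
  let sv := PySem.List.pyGetD shape index 0
  if expand_indices.contains index = false then
    (st.1 ++ [c], st.2.1 ++ [c], st.2.2.1, st.2.2.2.1 ++ [sv], st.2.2.2.2.1 ++ [sv], st.2.2.2.2.2)
  else
    (st.1, st.2.1 ++ [c], st.2.2.1 ++ [c], st.2.2.2.1, st.2.2.2.2.1 ++ [sv], st.2.2.2.2.2 ++ [sv])

def get_array_expansion_data (shape : List Int) (expand_indices : List Int) : String × List Int × List Int × List Int :=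
  let st := (PySem.List.pyRange 0 (shape.length : Int) 1).foldl (gaedStep shape expand_indices)
    ([], [], [], [], [], [])
  (String.ofList (st.1 ++ [','] ++ st.2.2.1 ++ ['-', '>'] ++ st.2.1), st.2.2.2.1, st.2.2.2.2.1, st.2.2.2.2.2)

-- ===== PORT B =====
def get_array_expansion_data_alt (shape : List Int) (expand_indices : List Int) : String × List Int × List Int × List Int :=
  let alphabet := "abcdefghij".toList
  let n := shape.length
  let out_string := alphabet.take n                     -- alphabet[:n]
  -- sorted({i for i in expand_indices if 0 <= i < n})
  let ones_pos := PySem.List.sorted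
    (PySem.Set.ofList (expand_indices.filter (fun i => decide (0 ≤ i) && decide (i < (n : Int))))) (fun x => x)
  -- alphabet[i] / shape[i]: pyGetD is exact here (ones_pos ⊆ [0, n), and i < 10 under Pre_)
  let ones_string := ones_pos.map (fun i => PySem.List.pyGetD alphabet i ' ')
  let ones_shape := ones_pos.map (fun i => PySem.List.pyGetD shape i 0)
  -- `del l[i]` with 0 ≤ i < len(l) is exactly List.eraseIdx i.toNat
  let in_chars := ones_pos.reverse.foldl (fun l i => l.eraseIdx i.toNat) out_string
  let in_dims := ones_pos.reverse.foldl (fun l i => l.eraseIdx i.toNat) shape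
  (String.ofList (in_chars ++ [','] ++ ones_string ++ ['-', '>'] ++ out_string), in_dims, shape, ones_shape)

-- ===== PRECONDITION & SPEC =====
-- Pre_ excludes len(shape) > 10 only: there A always raises IndexError (alphabet has 10 letters).
def Pre_get_array_expansion_data (shape : List Int) (expand_indices : List Int) : Prop := shape.length ≤ 10
instance (shape : List Int) (expand_indices : List Int) : Decidable (Pre_get_array_expansion_data shape expand_indices) := by unfold Pre_get_array_expansion_data; infer_instance
def pvWitness_get_array_expansion_data : List Int × List Int := ([3, 4, 5], [1])

def Spec_get_array_expansion_data (shape : List Int) (expand_indices : List Int) (out : String × List Int × List Int × List Int) : Prop := out = get_array_expansion_data_alt shape expand_indices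
instance (shape : List Int) (expand_indices : List Int) (out : String × List Int × List Int × List Int) : Decidable (Spec_get_array_expansion_data shape expand_indices out) := by unfold Spec_get_array_expansion_data; infer_instance

-- ===== CLAIM (what is proved, stated in full; the proofs are below) =====
def Claim_equal_get_array_expansion_data : Prop := ∀ (shape : List Int) (expand_indices : List Int), Dom_get_array_expansion_data shape expand_indices → Pre_get_array_expansion_data shape expand_indices → Spec_get_array_expansion_data shape expand_indices (get_array_expansion_data shape expand_indices)

-- ===== LEMMAS AND PROOFS =====

-- A's fused loop is six independent accumulations (its state components never interact)
theorem gaed_step_split (shape expand_indices : List Int) :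
    gaedStep shape expand_indices = fun st i =>
      ((if !expand_indices.contains i then st.1 ++ [PySem.List.pyGetD ("abcdefghij".toList) i ' '] else st.1),
       st.2.1 ++ [PySem.List.pyGetD ("abcdefghij".toList) i ' '],
       (if expand_indices.contains i then st.2.2.1 ++ [PySem.List.pyGetD ("abcdefghij".toList) i ' '] else st.2.2.1),
       (if !expand_indices.contains i then st.2.2.2.1 ++ [PySem.List.pyGetD shape i 0] else st.2.2.2.1),
       st.2.2.2.2.1 ++ [PySem.List.pyGetD shape i 0],
       (if expand_indices.contains i then st.2.2.2.2.2 ++ [PySem.List.pyGetD shape i 0] else st.2.2.2.2.2)) := by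
  funext st i
  by_cases h : i ∈ expand_indices <;> simp [gaedStep, h]

-- a prefix of the range-indexed rebuild of xs is xs.take n
theorem map_pyGetD_pyRange_take {α : Type} (xs : List α) (d : α) (n : Nat) (hn : n ≤ xs.length) :
    (PySem.List.pyRange 0 (n : Int) 1).map (fun j => PySem.List.pyGetD xs j d) = xs.take n := by
  have h1 := PySem.List.map_pyGetD_pyRange_zero (xs.take n) d
  have hlen : (xs.take n).length = n := by simp [Nat.min_eq_left hn]
  rw [show PySem.List.len (xs.take n) = (n : Int) by simp [PySem.List.len, hlen]] at h1
  rw [← h1]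
  apply List.map_congr_left
  intro j hj
  rw [PySem.List.mem_pyRange_one] at hj
  have h0 : j = ((j.toNat : Nat) : Int) := by omega
  have hjn : j.toNat < n := by omega
  rw [h0, PySem.List.pyGetD_natCast, PySem.List.pyGetD_natCast]
  simp [List.getD, hjn]

-- independent 6-component state: the fused fold is six folds (nested form of PySem.List.foldl_prod_mk)
theorem foldl_prod6 {β σ₁ σ₂ σ₃ σ₄ σ₅ σ₆ : Type}
    (f₁ : σ₁ → β → σ₁) (f₂ : σ₂ → β → σ₂) (f₃ : σ₃ → β → σ₃)
    (f₄ : σ₄ → β → σ₄) (f₅ : σ₅ → β → σ₅) (f₆ : σ₆ → β → σ₆) (l : List β)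
    (a₁ : σ₁) (a₂ : σ₂) (a₃ : σ₃) (a₄ : σ₄) (a₅ : σ₅) (a₆ : σ₆) :
    l.foldl (fun s e => (f₁ s.1 e, f₂ s.2.1 e, f₃ s.2.2.1 e, f₄ s.2.2.2.1 e, f₅ s.2.2.2.2.1 e, f₆ s.2.2.2.2.2 e))
        (a₁, a₂, a₃, a₄, a₅, a₆)
      = (l.foldl f₁ a₁, l.foldl f₂ a₂, l.foldl f₃ a₃, l.foldl f₄ a₄, l.foldl f₅ a₅, l.foldl f₆ a₆) := by
  induction l generalizing a₁ a₂ a₃ a₄ a₅ a₆ with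
  | nil => rfl
  | cons x xs ih => simp [List.foldl_cons, ih]

-- rebuilding a list from its surviving indices: full range, no deletions
theorem map_getD_range {α : Type} (xs : List α) (d : α) :
    (List.range xs.length).map (fun k => xs.getD k d) = xs := by
  apply List.ext_getElem
  · simp
  · intro i h1 h2
    simp [List.getD_eq_getElem?_getD, List.getElem?_eq_getElem h2]

-- deleting a strictly increasing list of positions back-to-front = keeping the other indices
theorem erase_fold_nat {α : Type} (d : α) (Q : List Nat) (hQ : Q.Pairwise (· < ·)) :
    ∀ xs : List α, (∀ q ∈ Q, q < xs.length) →
    Q.reverse.foldl (fun l k => l.eraseIdx k) xs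
      = ((List.range xs.length).filter (fun k => !Q.contains k)).map (fun k => xs.getD k d) := by
  induction Q using List.reverseRecOn with
  | nil =>
      intro xs _
      simpa using (map_getD_range xs d).symm
  | append_singleton Q' q ih =>
      intro xs hb
      have hQ' : Q'.Pairwise (· < ·) := hQ.sublist (List.sublist_append_left _ _)
      have hqmax : ∀ p ∈ Q', p < q := by
        have := (List.pairwise_append.mp hQ).2.2
        intro p hp; exact this p hp q (by simp)
      have hqn : q < xs.length := hb q (by simp)
      have hlen : (xs.eraseIdx q).length = xs.length - 1 := by
        rw [List.length_eraseIdx]; simp [hqn]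
      rw [List.reverse_append, List.reverse_singleton, List.singleton_append, List.foldl_cons,
        ih hQ' (xs.eraseIdx q) (by intro p hp; rw [hlen]; have := hqmax p hp; omega)]
      -- both sides split at position q
      have hm : xs.length - 1 - q + 1 + q = xs.length := by omega
      have hsplit1 : List.range (xs.eraseIdx q).length
          = List.range' 0 q ++ List.range' q (xs.length - 1 - q) := by
        rw [hlen, List.range_eq_range']
        rw [show List.range' q (xs.length - 1 - q) = List.range' (0 + 1 * q) (xs.length - 1 - q) by simp]
        rw [List.range'_append]
        congr 1; omega
      have hsplit2 : List.range xs.length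
          = List.range' 0 q ++ (q :: List.range' (q + 1) (xs.length - 1 - q)) := by
        rw [List.range_eq_range']
        rw [show (q :: List.range' (q + 1) (xs.length - 1 - q)) = List.range' (0 + 1 * q) (xs.length - 1 - q + 1) by
          rw [List.range'_succ]; simp]
        rw [List.range'_append]
        congr 1; omega
      rw [hsplit1, hsplit2, List.filter_append, List.filter_append, List.map_append, List.map_append]
      congr 1
      · -- prefix: indices < q are untouched and the [q] entry of the filter test is irrelevant
        rw [List.filter_congr (fun k hk => by
          have hkq : k < q := by
            have := List.mem_range'_1.mp hk; omega
          show (!Q'.contains k) = (!(Q' ++ [q]).contains k)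
          simp [Nat.ne_of_lt hkq])]
        apply List.map_congr_left
        intro k hk
        have hkq : k < q := by
          have := List.mem_range'_1.mp (List.mem_filter.mp hk).1; omega
        simp [List.getD_eq_getElem?_getD, List.getElem?_eraseIdx, hkq]
      · -- suffix: q itself is deleted, indices above q shift down by one
        have hkeep1 : ∀ k ∈ List.range' q (xs.length - 1 - q), (!Q'.contains k) = true := by
          intro k hk
          have hkq : q ≤ k := (List.mem_range'_1.mp hk).1
          simp only [Bool.not_eq_eq_eq_not, Bool.not_true, List.contains_eq_mem, decide_eq_false_iff_not]
          intro hmem; exact absurd (hqmax k hmem) (by omega)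
        have hkeep2 : ∀ k ∈ List.range' (q + 1) (xs.length - 1 - q), (!(Q' ++ [q]).contains k) = true := by
          intro k hk
          have hkq : q + 1 ≤ k := (List.mem_range'_1.mp hk).1
          simp only [Bool.not_eq_eq_eq_not, Bool.not_true, List.contains_eq_mem, decide_eq_false_iff_not,
            List.mem_append, List.mem_singleton]
          rintro (hmem | rfl)
          · exact absurd (hqmax k hmem) (by omega)
          · omega
        rw [List.filter_cons_of_neg (by simp), List.filter_eq_self.mpr hkeep1, List.filter_eq_self.mpr hkeep2]
        rw [List.range'_eq_map_range, List.range'_eq_map_range, List.map_map, List.map_map]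
        apply List.map_congr_left
        intro j _
        show (xs.eraseIdx q).getD (q + j) d = xs.getD (q + 1 + j) d
        have : q + j + 1 = q + 1 + j := by omega
        simp [List.getD_eq_getElem?_getD, List.getElem?_eraseIdx, this]

-- the same statement over Python-side Int positions and pyRange
theorem erase_fold_int {α : Type} (d : α) (P : List Int) (xs : List α)
    (hP : P.Pairwise (· < ·)) (hb : ∀ p ∈ P, 0 ≤ p ∧ p < (xs.length : Int)) :
    P.reverse.foldl (fun l i => l.eraseIdx i.toNat) xs
      = ((PySem.List.pyRange 0 (xs.length : Int) 1).filter (fun i => !P.contains i)).map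
          (fun i => PySem.List.pyGetD xs i d) := by
  have h1 : P.reverse.foldl (fun l i => l.eraseIdx i.toNat) xs
      = (P.map Int.toNat).reverse.foldl (fun l k => l.eraseIdx k) xs := by
    rw [← List.map_reverse, List.foldl_map]
  have hQpair : (P.map Int.toNat).Pairwise (· < ·) := by
    rw [List.pairwise_map]
    exact hP.imp_of_mem (fun ha hb' hlt => by
      have := (hb _ ha).1; omega)
  have hcont : ∀ k : Nat, P.contains ((k : Nat) : Int) = (P.map Int.toNat).contains k := by
    intro k
    have hmem : ((k : Int) ∈ P) ↔ k ∈ P.map Int.toNat := by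
      constructor
      · intro h; exact List.mem_map.mpr ⟨_, h, by omega⟩
      · intro h
        obtain ⟨p, hp, rfl⟩ := List.mem_map.mp h
        have h0 := (hb p hp).1
        rwa [show ((p.toNat : Nat) : Int) = p by omega]
    simp only [List.contains_eq_mem]
    exact decide_eq_decide.mpr hmem
  rw [h1, erase_fold_nat d _ hQpair xs (by
    intro q hq
    obtain ⟨p, hp, rfl⟩ := List.mem_map.mp hq
    have := hb p hp; omega)]
  rw [PySem.List.pyRange_zero_nat, List.filter_map, List.map_map]
  rw [List.filter_congr (fun k _ => by
    show (!(P.map Int.toNat).contains k) = ((fun i => !P.contains i) ∘ (fun k : Nat => (k : Int))) k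
    simp only [Function.comp_apply]
    rw [← hcont k])]
  apply List.map_congr_left
  intro k _
  simp [PySem.List.pyGetD_natCast]

-- sorted({i for i in E if 0 <= i < n}) is exactly the increasing filter of range(n)
theorem ones_pos_eq (expand_indices : List Int) (n : Nat) :
    PySem.List.sorted
      (PySem.Set.ofList (expand_indices.filter (fun i => decide (0 ≤ i) && decide (i < (n : Int))))) (fun x => x)
      = (PySem.List.pyRange 0 (n : Int) 1).filter (fun i => expand_indices.contains i) := by
  apply PySem.List.sorted_eq_of_perm_of_pairwise_lt
  · rw [List.perm_ext_iff_of_nodup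
      (List.Nodup.filter _ (PySem.List.nodup_pyRange_one _ _)) (PySem.Set.nodup_ofList _)]
    intro a
    rw [List.mem_filter, PySem.Set.mem_ofList, List.mem_filter, PySem.List.mem_pyRange_one]
    simp [List.contains_eq_mem, and_comm]
  · exact List.Pairwise.filter _ (PySem.List.pairwise_lt_pyRange_one _ _)

-- ===== VERDICT (by name: the statement is the Claim_ definition above) =====
theorem get_array_expansion_data_spec : Claim_equal_get_array_expansion_data := by
  intro shape expand_indices _ hpre
  unfold Spec_get_array_expansion_data get_array_expansion_data get_array_expansion_data_alt
  rw [gaed_step_split]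
  rw [foldl_prod6
    (fun acc i => if (!expand_indices.contains i) = true then acc ++ [PySem.List.pyGetD ("abcdefghij".toList) i ' '] else acc)
    (fun acc i => acc ++ [PySem.List.pyGetD ("abcdefghij".toList) i ' '])
    (fun acc i => if expand_indices.contains i = true then acc ++ [PySem.List.pyGetD ("abcdefghij".toList) i ' '] else acc)
    (fun acc i => if (!expand_indices.contains i) = true then acc ++ [PySem.List.pyGetD shape i 0] else acc)
    (fun acc i => acc ++ [PySem.List.pyGetD shape i 0])
    (fun acc i => if expand_indices.contains i = true then acc ++ [PySem.List.pyGetD shape i 0] else acc)]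
  rw [PySem.List.foldl_append_if, PySem.List.foldl_append_if, PySem.List.foldl_append_if,
      PySem.List.foldl_append_if, PySem.List.foldl_append_singleton_eq_map,
      PySem.List.foldl_append_singleton_eq_map]
  have hlen : PySem.List.len shape = (shape.length : Int) := by simp [PySem.List.len]
  have hout : (PySem.List.pyRange 0 (shape.length : Int) 1).map (fun j => PySem.List.pyGetD shape j 0) = shape := by
    have := PySem.List.map_pyGetD_pyRange_zero shape 0
    rwa [hlen] at this
  have htake := map_pyGetD_pyRange_take ("abcdefghij".toList) ' ' shape.length (by simpa using hpre)
  -- the change region F and its complement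
  set F := (PySem.List.pyRange 0 (shape.length : Int) 1).filter (fun i => expand_indices.contains i) with hF
  have hFpair : F.Pairwise (· < ·) := List.Pairwise.filter _ (PySem.List.pairwise_lt_pyRange_one _ _)
  have hFb : ∀ p ∈ F, 0 ≤ p ∧ p < (shape.length : Int) := by
    intro p hp
    exact PySem.List.mem_pyRange_one.mp (List.mem_filter.mp hp).1
  have hnotF :
      (PySem.List.pyRange 0 (shape.length : Int) 1).filter (fun i => !F.contains i)
        = (PySem.List.pyRange 0 (shape.length : Int) 1).filter (fun i => !expand_indices.contains i) := by
    apply List.filter_congr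
    intro i hi
    have hiff : (i ∈ F) ↔ (i ∈ expand_indices) := by
      rw [hF]; simp [List.mem_filter, hi, List.contains_eq_mem]
    simp [List.contains_eq_mem, hiff]
  have hp10 : shape.length ≤ 10 := hpre
  have htl : (List.take shape.length ("abcdefghij".toList)).length = shape.length := by
    simp [Nat.min_eq_left hp10]
  have hones := ones_pos_eq expand_indices shape.length
  have herase1 := erase_fold_int ' ' F (List.take shape.length ("abcdefghij".toList)) hFpair (by
    intro p hp; rw [htl]; exact hFb p hp)
  have herase2 := erase_fold_int 0 F shape hFpair hFb
  rw [htl] at herase1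
  rw [hnotF] at herase1 herase2
  have hmapcong : List.map (fun i => PySem.List.pyGetD (List.take shape.length ("abcdefghij".toList)) i ' ')
      (List.filter (fun i => !expand_indices.contains i) (PySem.List.pyRange 0 (shape.length : Int) 1))
    = List.map (fun i => PySem.List.pyGetD ("abcdefghij".toList) i ' ')
      (List.filter (fun i => !expand_indices.contains i) (PySem.List.pyRange 0 (shape.length : Int) 1)) := by
    apply List.map_congr_left
    intro i hi
    have hmem := PySem.List.mem_pyRange_one.mp (List.mem_filter.mp hi).1
    have hlt : i.toNat < shape.length := by omega
    rw [show i = ((i.toNat : Nat) : Int) by omega, PySem.List.pyGetD_natCast, PySem.List.pyGetD_natCast]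
    simp [List.getD_eq_getElem?_getD, hlt]
  simp only [hones, ← hF, List.nil_append, herase1, herase2, hmapcong, htake, hout]
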